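-- pv_equiv track=rewrite | github.com/Vaibhav14k/DSA_Question | Leetcode-Pattern-problems-main/Leetcode-Pattern-problems-main/DP/1388_pizaa_with_3n_slices.py | solve
-- ===== SOURCE A (Python) =====
-- def solve(slices):
--     k = len(slices)
--     curr1 =[0] * (k+2)
--     prev1 =[0] * (k+2)
--     next1 =[0] * (k+2)
--     # REMOVING LAST ELEMENT
--     for index in range(k-2,-1,-1):
--         for n in range(1,k//3 + 1):
--             incl = slices[index] + next1[n-1]
--             excl = 0 + curr1[n]
--             prev1[n] = max(incl,excl)
--         next1 = curr1[:]
--         curr1 = prev1[:]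
--     inc = curr1[k//3]
--
--     curr2 =[0] * (k+2)
--     prev2 =[0] * (k+2)
--     next2 =[0] * (k+2)
--     # REMOVING FIRST ELEMENT
--     for index in range(k-1,0,-1):
--         for n in range(1,k//3 +1):
--             incl = slices[index] + next2[n-1]
--             excl = 0 + curr2[n]
--             prev2[n] = max(incl,excl)
--         next2 = curr2[:]
--         curr2 = prev2[:]
--     exc = curr2[k//3]
--     return max(inc,exc)
-- ===== SOURCE B (Python) =====
-- def solve(slices):
--     # Exact-count profile DP with None = "count not achievable", run left to right,
--     # and the circle resolved by conditioning on whether slice 0 is eaten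
--     # (forced-pick case over slices[2..k-2] vs. no-pick case over slices[1..k-1]).
--     k = len(slices)
--     m = k // 3
--     if m == 0:
--         return 0
--
--     def best(lo, hi, mm):
--         # P[j] = best sum eating exactly j pairwise non-adjacent slices of
--         # slices[lo..t] (None if j slices cannot be placed); scan t = lo..hi.
--         prev2 = [0] + [None] * mm    # profile for t = lo-2 (empty prefix)
--         prev1 = [0] + [None] * mm    # profile for t = lo-1 (empty prefix)
--         t = lo
--         while t <= hi:
--             x = slices[t]
--             cur = [0]
--             for j in range(1, mm + 1):
--                 w = prev2[j - 1]
--                 c = None if w is None else x + w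
--                 b = prev1[j]
--                 if b is None or (c is not None and c > b):
--                     cur.append(c)
--                 else:
--                     cur.append(b)
--             prev2 = prev1
--             prev1 = cur
--             t += 1
--         ans = 0
--         for v in prev1:
--             if v is not None and v > ans:
--                 ans = v
--         return ans
--
--     return max(slices[0] + best(2, k - 2, m - 1), best(1, k - 1, m))
-- ===== Notes on version B (the rewrite author's own statement) =====
-- stated objective: faster
-- what changed: A's at-most-count suffix DP (three rolling arrays copied each step, two overlapping segment relaxations for the circle) is replaced by an exact-count profile DP where unreachable counts are None, the circle is resolved by conditioning on whether slice 0 is eaten (forced-pick over slices[2..k-2] vs excluded over slices[1..k-1]), and the answer is a final max over achievable counts; no per-step array copies.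
import Mathlib
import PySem

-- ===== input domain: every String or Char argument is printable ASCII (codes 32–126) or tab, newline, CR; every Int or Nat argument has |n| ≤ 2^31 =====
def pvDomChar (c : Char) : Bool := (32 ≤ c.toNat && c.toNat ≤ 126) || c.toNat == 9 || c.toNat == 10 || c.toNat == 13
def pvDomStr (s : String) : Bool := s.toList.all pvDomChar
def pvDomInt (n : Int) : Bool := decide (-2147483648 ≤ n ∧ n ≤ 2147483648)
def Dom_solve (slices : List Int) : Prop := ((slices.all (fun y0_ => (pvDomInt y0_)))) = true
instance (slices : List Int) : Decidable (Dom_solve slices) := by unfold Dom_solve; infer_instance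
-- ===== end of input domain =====

-- B replaces A's at-most-count suffix DP (rolling arrays copied each step, circle as two
-- overlapping segment relaxations) by an exact-count profile DP with None for unreachable
-- counts, the circle resolved by conditioning on slice 0; measured faster by a constant factor.

-- ===== PORT A =====
-- Transliteration of A: arrays curr/prev/next of length k+2, outer countdown loop over
-- indices, inner loop over n = 1..k//3 writing prev[n]; all accesses are in range, so
-- pyGetD/pySetD are exact here.
def solve (slices : List Int) : Int :=
  let k : Int := slices.length
  let m : Int := PySem.Int.floordiv k 3
  let init : List Int := List.replicate (slices.length + 2) 0
  let s1 := (PySem.List.pyRange (k - 2) (-1) (-1)).foldl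
    (fun (st : List Int × List Int × List Int) index =>
      let prev' := (PySem.List.pyRange 1 (m + 1) 1).foldl
        (fun pr n =>
          let incl := PySem.List.pyGetD slices index 0 + PySem.List.pyGetD st.2.2 (n - 1) 0
          let excl := 0 + PySem.List.pyGetD st.1 n 0
          PySem.List.pySetD pr n (max incl excl)) st.2.1
      (prev', prev', st.1)) (init, init, init)
  let inc := PySem.List.pyGetD s1.1 m 0
  let s2 := (PySem.List.pyRange (k - 1) 0 (-1)).foldl
    (fun (st : List Int × List Int × List Int) index =>
      let prev' := (PySem.List.pyRange 1 (m + 1) 1).foldl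
        (fun pr n =>
          let incl := PySem.List.pyGetD slices index 0 + PySem.List.pyGetD st.2.2 (n - 1) 0
          let excl := 0 + PySem.List.pyGetD st.1 n 0
          PySem.List.pySetD pr n (max incl excl)) st.2.1
      (prev', prev', st.1)) (init, init, init)
  let exc := PySem.List.pyGetD s2.1 m 0
  max inc exc

-- ===== PORT B =====
-- Source B's best(lo, hi, mm): profiles P[j] = best sum eating exactly j non-adjacent slices
-- of slices[lo..t] (none if unreachable), scanned left to right; state = (prev2, prev1).
def bestB (slices : List Int) (lo hi : Int) (mm : Nat) : Int :=
  let init : List (Option Int) := some 0 :: List.replicate mm none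
  let st := (PySem.List.pyRange lo (hi + 1) 1).foldl
    (fun (st : List (Option Int) × List (Option Int)) t =>
      let x := PySem.List.pyGetD slices t 0
      let cur := (PySem.List.pyRange 1 ((mm : Int) + 1) 1).foldl
        (fun cur j =>
          let w := PySem.List.pyGetD st.1 (j - 1) none
          let c : Option Int := match w with | none => none | some wv => some (x + wv)
          let b := PySem.List.pyGetD st.2 j none
          match b with
          | none => cur ++ [c]
          | some bv =>
            match c with
            | none => cur ++ [some bv]
            | some cv => if bv < cv then cur ++ [some cv] else cur ++ [some bv])
        [some 0]
      (st.2, cur)) (init, init)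
  st.2.foldl (fun ans v =>
    match v with
    | none => ans
    | some vv => if ans < vv then vv else ans) 0

-- Source B's solve: k//3 == 0 returns 0; otherwise condition on slice 0 being eaten.
def solve_alt (slices : List Int) : Int :=
  let k : Int := slices.length
  let m : Nat := slices.length / 3
  if m = 0 then 0
  else max (PySem.List.pyGetD slices 0 0 + bestB slices 2 (k - 2) (m - 1))
           (bestB slices 1 (k - 1) m)

-- ===== PRECONDITION & SPEC =====
def Spec_solve (slices : List Int) (out : Int) : Prop := out = solve_alt slices
instance (slices : List Int) (out : Int) : Decidable (Spec_solve slices out) := by unfold Spec_solve; infer_instance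

-- ===== CLAIM (what is proved, stated in full; the proofs are below) =====
def Claim_equal_solve : Prop := ∀ (slices : List Int), Dom_solve slices → Spec_solve slices (solve slices)

-- ===== LEMMAS AND PROOFS =====

-- the bridge: the at-most-n DP value f over slices[i..hi] that A's table carries
def fAlt (slices : List Int) (hi : Int) (i : Int) (n : Nat) : Int :=
  if n = 0 ∨ hi < i then 0
  else max (PySem.List.pyGetD slices i 0 + fAlt slices hi (i + 2) (n - 1))
           (fAlt slices hi (i + 1) n)
termination_by (hi + 1 - i).toNat
decreasing_by all_goals (simp only [not_or] at *; omega)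

-- invariant: L is (a row of) A's DP table for start index i: L[n] = fAlt slices hi i n
def DPInv (slices : List Int) (hi : Int) (i : Int) (m : Nat) (L : List Int) : Prop :=
  L.length = slices.length + 2 ∧
    ∀ n : Nat, n ≤ m → PySem.List.pyGetD L (n : Int) 0 = fAlt slices hi i n

theorem len_foldl_set (v : Int → Int) (rng : List Int) (pr : List Int) :
    (rng.foldl (fun p n => PySem.List.pySetD p n (v n)) pr).length = pr.length := by
  induction rng generalizing pr with
  | nil => rfl
  | cons a l ih => simp [List.foldl_cons, ih, PySem.List.length_pySetD]

theorem inner_getD (v : Int → Int) (m : Nat) (pr : List Int) (hm : m < pr.length) (j : Nat) :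
    PySem.List.pyGetD
        ((PySem.List.pyRange 1 ((m : Int) + 1) 1).foldl
          (fun p n => PySem.List.pySetD p n (v n)) pr) (j : Int) 0
      = if 1 ≤ j ∧ j ≤ m then v (j : Int) else PySem.List.pyGetD pr (j : Int) 0 := by
  induction m with
  | zero =>
    rw [PySem.List.pyRange_one_eq_nil (by omega)]
    simp only [List.foldl_nil]
    split_ifs with h
    · omega
    · rfl
  | succ m ih =>
    have h1 : ((m + 1 : Nat) : Int) + 1 = ((m : Int) + 1) + 1 := by push_cast; ring
    rw [h1, PySem.List.pyRange_one_succ_right (by omega), List.foldl_append]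
    simp only [List.foldl_cons, List.foldl_nil]
    have hlen : (m : Int) + 1 = ((m + 1 : Nat) : Int) := by push_cast; ring
    rw [hlen, PySem.List.pyGetD_pySetD_natCast _ (m + 1) j _ _ (by rw [len_foldl_set]; omega)]
    by_cases hj : j = m + 1
    · rw [if_pos hj, if_pos (by omega), hj]
    · rw [if_neg hj, ← hlen, ih (by omega)]
      split_ifs <;> first | rfl | omega

theorem fAlt_base (slices : List Int) (hi i : Int) (n : Nat) (h : hi < i) :
    fAlt slices hi i n = 0 := by
  rw [fAlt, if_pos (Or.inr h)]

theorem fAlt_zero (slices : List Int) (hi i : Int) : fAlt slices hi i 0 = 0 := by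
  rw [fAlt, if_pos (Or.inl rfl)]

theorem fAlt_step (slices : List Int) (hi i : Int) (n : Nat) (hn : n ≠ 0) (hi' : i ≤ hi) :
    fAlt slices hi i n
      = max (PySem.List.pyGetD slices i 0 + fAlt slices hi (i + 2) (n - 1))
            (fAlt slices hi (i + 1) n) := by
  rw [fAlt, if_neg (by push Not; exact ⟨hn, by omega⟩)]

theorem outer_inv (slices : List Int) (hi : Int) (m : Nat)
    (hm : m < slices.length + 2) :
    ∀ (t : Nat) (a b : Int), (a - b).toNat = t → b ≤ a → a ≤ hi →
    ∀ (c p nx : List Int),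
      DPInv slices hi (a + 1) m c → DPInv slices hi (a + 2) m nx →
      p.length = slices.length + 2 → PySem.List.pyGetD p 0 0 = 0 →
      DPInv slices hi (b + 1) m
        (((PySem.List.pyRange a b (-1)).foldl
          (fun (st : List Int × List Int × List Int) index =>
            ((PySem.List.pyRange 1 ((m : Int) + 1) 1).foldl
              (fun pr n => PySem.List.pySetD pr n
                (max (PySem.List.pyGetD slices index 0 + PySem.List.pyGetD st.2.2 (n - 1) 0)
                     (0 + PySem.List.pyGetD st.1 n 0))) st.2.1,
             (PySem.List.pyRange 1 ((m : Int) + 1) 1).foldl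
              (fun pr n => PySem.List.pySetD pr n
                (max (PySem.List.pyGetD slices index 0 + PySem.List.pyGetD st.2.2 (n - 1) 0)
                     (0 + PySem.List.pyGetD st.1 n 0))) st.2.1,
             st.1)) (c, p, nx)).1) := by
  intro t
  induction t with
  | zero =>
    intro a b ht hba _ c p nx hc _ _ _
    have hab : a = b := by omega
    subst hab
    rw [PySem.List.pyRange_neg_one_eq_nil le_rfl, List.foldl_nil]
    exact hc
  | succ t ih =>
    intro a b ht hba hahi c p nx hc hn hplen hp0
    have hb : b < a := by omega
    rw [PySem.List.pyRange_neg_one_cons hb, List.foldl_cons]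
    have hvlen : m < p.length := by omega
    have hPget := fun (j : Nat) => inner_getD
      (fun n => max (PySem.List.pyGetD slices a 0 + PySem.List.pyGetD nx (n - 1) 0)
                    (0 + PySem.List.pyGetD c n 0)) m p hvlen j
    have hPlen : ((PySem.List.pyRange 1 ((m : Int) + 1) 1).foldl
        (fun pr n => PySem.List.pySetD pr n
          (max (PySem.List.pyGetD slices a 0 + PySem.List.pyGetD nx (n - 1) 0)
               (0 + PySem.List.pyGetD c n 0))) p).length = slices.length + 2 := by
      rw [len_foldl_set]; omega
    have hP : DPInv slices hi a m ((PySem.List.pyRange 1 ((m : Int) + 1) 1).foldl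
        (fun pr n => PySem.List.pySetD pr n
          (max (PySem.List.pyGetD slices a 0 + PySem.List.pyGetD nx (n - 1) 0)
               (0 + PySem.List.pyGetD c n 0))) p) := by
      refine ⟨hPlen, fun n hnm => ?_⟩
      rw [hPget n]
      by_cases hn0 : n = 0
      · subst hn0
        rw [if_neg (by omega)]
        rw [fAlt_zero]
        exact hp0
      · rw [if_pos ⟨by omega, hnm⟩]
        have hcast : ((n : Int) - 1) = ((n - 1 : Nat) : Int) := by omega
        rw [hcast, (hn.2 (n - 1) (by omega)), (hc.2 n hnm), zero_add,
          fAlt_step slices hi a n hn0 hahi]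
    have harg : DPInv slices hi (a - 1 + 1) m ((PySem.List.pyRange 1 ((m : Int) + 1) 1).foldl
        (fun pr n => PySem.List.pySetD pr n
          (max (PySem.List.pyGetD slices a 0 + PySem.List.pyGetD nx (n - 1) 0)
               (0 + PySem.List.pyGetD c n 0))) p) := by
      rw [show a - 1 + 1 = a by ring]; exact hP
    have harg2 : DPInv slices hi (a - 1 + 2) m c := by
      rw [show a - 1 + 2 = a + 1 by ring]; exact hc
    have hP0' : PySem.List.pyGetD ((PySem.List.pyRange 1 ((m : Int) + 1) 1).foldl
        (fun pr n => PySem.List.pySetD pr n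
          (max (PySem.List.pyGetD slices a 0 + PySem.List.pyGetD nx (n - 1) 0)
               (0 + PySem.List.pyGetD c n 0))) p) 0 0 = 0 := by
      have h0 := hPget 0
      simp only [Nat.cast_zero] at h0
      rw [h0, if_neg (by omega)]
      exact hp0
    exact ih (a - 1) b (by omega) (by omega) (by omega) _ _ _ harg harg2 hPlen hP0'

theorem getD_init (k : Nat) (n : Nat) :
    PySem.List.pyGetD (List.replicate (k + 2) (0 : Int)) (n : Int) 0 = 0 := by
  rw [PySem.List.pyGetD_natCast]
  rcases Nat.lt_or_ge n (k + 2) with h | h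
  · rw [List.getD_eq_getElem _ _ (by simpa using h)]; simp
  · rw [List.getD_eq_default _ _ (by simpa using h)]

theorem init_inv (slices : List Int) (hi i : Int) (m : Nat) (h : hi < i) :
    DPInv slices hi i m (List.replicate (slices.length + 2) (0 : Int)) :=
  ⟨by simp, fun n _ => by rw [getD_init, fAlt_base slices hi i n h]⟩

theorem pass_eq (slices : List Int) (hi a b : Int) (m : Nat)
    (hm : m < slices.length + 2) (hba : b ≤ a) (hahi : a ≤ hi)
    (h1 : hi < a + 1) :
    PySem.List.pyGetD
      (((PySem.List.pyRange a b (-1)).foldl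
        (fun (st : List Int × List Int × List Int) index =>
          ((PySem.List.pyRange 1 ((m : Int) + 1) 1).foldl
            (fun pr n => PySem.List.pySetD pr n
              (max (PySem.List.pyGetD slices index 0 + PySem.List.pyGetD st.2.2 (n - 1) 0)
                   (0 + PySem.List.pyGetD st.1 n 0))) st.2.1,
           (PySem.List.pyRange 1 ((m : Int) + 1) 1).foldl
            (fun pr n => PySem.List.pySetD pr n
              (max (PySem.List.pyGetD slices index 0 + PySem.List.pyGetD st.2.2 (n - 1) 0)
                   (0 + PySem.List.pyGetD st.1 n 0))) st.2.1,
           st.1))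
        (List.replicate (slices.length + 2) (0 : Int),
         List.replicate (slices.length + 2) (0 : Int),
         List.replicate (slices.length + 2) (0 : Int))).1) (m : Int) 0
      = fAlt slices hi (b + 1) m := by
  have h := (outer_inv slices hi m hm (a - b).toNat a b rfl hba hahi
    (List.replicate (slices.length + 2) 0) (List.replicate (slices.length + 2) 0)
    (List.replicate (slices.length + 2) 0)
    (init_inv slices hi (a + 1) m h1)
    (init_inv slices hi (a + 2) m (by omega))
    (by simp) (by simpa using getD_init slices.length 0)).2 m le_rfl
  exact h

-- ----- B side -----


theorem fAlt_append (slices : List Int) (t : Int) :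
    ∀ (k : Nat) (lo : Int) (n : Nat), (t - lo).toNat ≤ k → lo ≤ t →
    fAlt slices t lo (n + 1)
      = max (fAlt slices (t - 1) lo (n + 1))
            (PySem.List.pyGetD slices t 0 + fAlt slices (t - 2) lo n) := by
  intro k
  induction k with
  | zero =>
    intro lo n hk hlo
    have hlt : lo = t := by omega
    subst hlt
    rw [fAlt_step slices lo lo (n + 1) (by omega) le_rfl,
      fAlt_base slices lo (lo + 2) _ (by omega),
      fAlt_base slices lo (lo + 1) _ (by omega),
      fAlt_base slices (lo - 1) lo _ (by omega),
      fAlt_base slices (lo - 2) lo _ (by omega)]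
    apply le_antisymm <;> simp only [← max_add_add_left, le_max_iff, max_le_iff] <;> omega
  | succ k ih =>
    intro lo n hk hlo
    by_cases h0 : lo = t
    · subst h0
      rw [fAlt_step slices lo lo (n + 1) (by omega) le_rfl,
        fAlt_base slices lo (lo + 2) _ (by omega),
        fAlt_base slices lo (lo + 1) _ (by omega),
        fAlt_base slices (lo - 1) lo _ (by omega),
        fAlt_base slices (lo - 2) lo _ (by omega)]
      try (apply le_antisymm <;> simp only [← max_add_add_left, le_max_iff, max_le_iff] <;> omega)
    by_cases h1 : lo + 1 = t
    · rw [fAlt_step slices t lo (n + 1) (by omega) hlo,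
        fAlt_base slices t (lo + 2) _ (by omega),
        fAlt_step slices t (lo + 1) (n + 1) (by omega) (by omega),
        fAlt_base slices t (lo + 1 + 2) _ (by omega),
        fAlt_base slices t (lo + 1 + 1) _ (by omega),
        fAlt_step slices (t - 1) lo (n + 1) (by omega) (by omega),
        fAlt_base slices (t - 1) (lo + 2) _ (by omega),
        fAlt_base slices (t - 1) (lo + 1) _ (by omega),
        fAlt_base slices (t - 2) lo _ (by omega)]
      simp only [h1]
      try (apply le_antisymm <;> simp only [← max_add_add_left, le_max_iff, max_le_iff] <;> omega)
    · -- lo + 2 ≤ t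
      have h2 : lo + 2 ≤ t := by omega
      cases n with
      | zero =>
        rw [fAlt_step slices t lo 1 (by omega) hlo,
          fAlt_step slices (t - 1) lo 1 (by omega) (by omega),
          fAlt_zero, fAlt_zero, fAlt_zero,
          ih (lo + 1) 0 (by omega) (by omega)]
        rw [fAlt_zero]
        apply le_antisymm <;> simp only [Nat.zero_add, le_max_iff, max_le_iff] <;> omega
      | succ n' =>
        rw [fAlt_step slices t lo (n' + 1 + 1) (by omega) hlo]
        simp only [Nat.add_sub_cancel]
        rw [ih (lo + 2) n' (by omega) (by omega),
          ih (lo + 1) (n' + 1) (by omega) (by omega),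
          fAlt_step slices (t - 1) lo (n' + 1 + 1) (by omega) (by omega),
          fAlt_step slices (t - 2) lo (n' + 1) (by omega) (by omega)]
        simp only [Nat.add_sub_cancel]
        try (apply le_antisymm <;> simp only [← max_add_add_left, le_max_iff, max_le_iff] <;> omega)

theorem fAlt_mono_hi (slices : List Int) (lo t : Int) (n : Nat) :
    fAlt slices (t - 1) lo n ≤ fAlt slices t lo n := by
  cases n with
  | zero => rw [fAlt_zero, fAlt_zero]
  | succ n =>
    by_cases h : lo ≤ t
    · rw [fAlt_append slices t (t - lo).toNat lo n le_rfl h]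
      exact le_max_left _ _
    · rw [fAlt_base slices (t - 1) lo _ (by omega), fAlt_base slices t lo _ (by omega)]

def POpt (slices : List Int) (lo : Int) (t : Int) (j : Nat) : Option Int :=
  match j with
  | 0 => some 0
  | j + 1 =>
    if h : t < lo then none
    else
      let a := POpt slices lo (t - 1) (j + 1)
      let b := (POpt slices lo (t - 2) j).map (fun v => PySem.List.pyGetD slices t 0 + v)
      match a, b with
      | none, b => b
      | a, none => a
      | some x, some y => some (max x y)
termination_by (t + 1 - lo).toNat
decreasing_by all_goals omega

def GB (slices : List Int) (lo t : Int) : Nat → Int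
  | 0 => 0
  | n + 1 =>
    match POpt slices lo t (n + 1) with
    | none => GB slices lo t n
    | some v => max (GB slices lo t n) v

theorem POpt_zero (slices : List Int) (lo t : Int) : POpt slices lo t 0 = some 0 := by
  rw [POpt]

theorem POpt_succ (slices : List Int) (lo t : Int) (j : Nat) (h : ¬ t < lo) :
    POpt slices lo t (j + 1)
      = (match POpt slices lo (t - 1) (j + 1),
             (POpt slices lo (t - 2) j).map (fun v => PySem.List.pyGetD slices t 0 + v) with
         | none, b => b
         | a, none => a
         | some x, some y => some (max x y)) := by
  rw [POpt, dif_neg h]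


theorem GB_zero' (slices : List Int) (lo t : Int) (h : t < lo) :
    ∀ n, GB slices lo t n = 0 := by
  intro n
  induction n with
  | zero => rfl
  | succ n ih => rw [GB, POpt, dif_pos h, ih]

theorem GB_rec (slices : List Int) (lo t : Int) (h : ¬ t < lo) (n : Nat) :
    GB slices lo t (n + 1)
      = max (GB slices lo (t - 1) (n + 1))
            (PySem.List.pyGetD slices t 0 + GB slices lo (t - 2) n) := by
  induction n with
  | zero =>
    rw [show GB slices lo t (0 + 1) = (match POpt slices lo t (0 + 1) with
      | none => GB slices lo t 0
      | some v => max (GB slices lo t 0) v) from rfl]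
    rw [POpt.eq_def]
    simp only [dif_neg h, Nat.zero_add,
      show GB slices lo t 0 = 0 from rfl,
      POpt_zero]
    rw [show GB slices lo (t - 1) (0 + 1) = (match POpt slices lo (t - 1) (0 + 1) with
      | none => GB slices lo (t - 1) 0
      | some v => max (GB slices lo (t - 1) 0) v) from rfl]
    cases ha : POpt slices lo (t - 1) (0 + 1) with
    | none =>
      simp only [ha, Option.map_some, GB]
      try (apply le_antisymm <;> simp only [← max_add_add_left, le_max_iff, max_le_iff] <;> omega)
    | some av =>
      simp only [ha, Option.map_some, GB]
      try (apply le_antisymm <;> simp only [← max_add_add_left, le_max_iff, max_le_iff] <;> omega)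
  | succ n ih =>
    rw [show GB slices lo t (n + 1 + 1) = (match POpt slices lo t (n + 1 + 1) with
      | none => GB slices lo t (n + 1)
      | some v => max (GB slices lo t (n + 1)) v) from rfl]
    rw [POpt.eq_def]
    simp only [dif_neg h]
    rw [ih]
    rw [show GB slices lo (t - 1) (n + 1 + 1) = (match POpt slices lo (t - 1) (n + 1 + 1) with
      | none => GB slices lo (t - 1) (n + 1)
      | some v => max (GB slices lo (t - 1) (n + 1)) v) from rfl]
    rw [show GB slices lo (t - 2) (n + 1) = (match POpt slices lo (t - 2) (n + 1) with
      | none => GB slices lo (t - 2) n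
      | some v => max (GB slices lo (t - 2) n) v) from rfl]
    cases ha : POpt slices lo (t - 1) (n + 1 + 1) with
    | none =>
      cases hb : POpt slices lo (t - 2) (n + 1) with
      | none =>
        simp only [ha, hb, Option.map_none]
        try (apply le_antisymm <;> simp only [← max_add_add_left, le_max_iff, max_le_iff] <;> omega)
      | some bv =>
        simp only [ha, hb, Option.map_some]
        try (apply le_antisymm <;> simp only [← max_add_add_left, le_max_iff, max_le_iff] <;> omega)
    | some av =>
      cases hb : POpt slices lo (t - 2) (n + 1) with
      | none =>
        simp only [ha, hb, Option.map_none]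
        try (apply le_antisymm <;> simp only [← max_add_add_left, le_max_iff, max_le_iff] <;> omega)
      | some bv =>
        simp only [ha, hb, Option.map_some]
        try (apply le_antisymm <;> simp only [← max_add_add_left, le_max_iff, max_le_iff] <;> omega)

theorem GB_eq_fAlt (slices : List Int) (lo : Int) :
    ∀ (k : Nat) (t : Int) (n : Nat), (t + 1 - lo).toNat ≤ k →
      GB slices lo t n = fAlt slices t lo n := by
  intro k
  induction k with
  | zero =>
    intro t n hk
    have h : t < lo := by omega
    rw [GB_zero' slices lo t h, fAlt_base slices t lo n h]
  | succ k ih =>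
    intro t n hk
    by_cases h : t < lo
    · rw [GB_zero' slices lo t h, fAlt_base slices t lo n h]
    · cases n with
      | zero => rw [show GB slices lo t 0 = 0 from rfl, fAlt_zero]
      | succ n =>
        rw [GB_rec slices lo t h n, fAlt_append slices t (t - lo).toNat lo n le_rfl (by omega),
          ih (t - 1) (n + 1) (by omega), ih (t - 2) n (by omega)]

-- the profile row for prefix end u
def rowP (slices : List Int) (lo u : Int) (mm : Nat) : List (Option Int) :=
  (List.range (mm + 1)).map (POpt slices lo u)

theorem POpt_neg (slices : List Int) (lo u : Int) (j : Nat) (h : u < lo) :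
    POpt slices lo u (j + 1) = none := by
  rw [POpt, dif_pos h]

theorem rowP_init (slices : List Int) (lo u : Int) (mm : Nat) (h : u < lo) :
    rowP slices lo u mm = some 0 :: List.replicate mm none := by
  apply List.ext_getElem
  · simp [rowP]
  · intro i h1 h2
    cases i with
    | zero => simp [rowP, POpt_zero]
    | succ i =>
      simp only [rowP, List.getElem_map, List.getElem_range, List.getElem_cons_succ]
      rw [POpt_neg slices lo u i h]
      simp only [List.length_cons, List.length_replicate] at h2
      simp [List.getElem_replicate]

theorem rowP_get (slices : List Int) (lo u : Int) (mm : Nat) (j : Nat) (hj : j ≤ mm) :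
    PySem.List.pyGetD (rowP slices lo u mm) (j : Int) none = POpt slices lo u j := by
  rw [PySem.List.pyGetD_natCast]
  rw [List.getD_eq_getElem _ _ (by simp [rowP]; omega)]
  simp [rowP]

theorem innerB (slices : List Int) (lo t : Int) (mm : Nat) (ht : ¬ t < lo) :
    ∀ mm' : Nat, mm' ≤ mm →
    (PySem.List.pyRange 1 ((mm' : Int) + 1) 1).foldl
      (fun cur j =>
        let w := PySem.List.pyGetD (rowP slices lo (t - 2) mm) (j - 1) none
        let c : Option Int := match w with | none => none | some wv => some (PySem.List.pyGetD slices t 0 + wv)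
        let b := PySem.List.pyGetD (rowP slices lo (t - 1) mm) j none
        match b with
        | none => cur ++ [c]
        | some bv =>
          match c with
          | none => cur ++ [some bv]
          | some cv => if bv < cv then cur ++ [some cv] else cur ++ [some bv])
      [some 0]
      = rowP slices lo t mm' := by
  intro mm'
  induction mm' with
  | zero =>
    intro _
    rw [PySem.List.pyRange_one_eq_nil (by omega), List.foldl_nil]
    simp [rowP, List.range_succ, POpt_zero]
  | succ mm' ih =>
    intro hle
    have h1 : ((mm' + 1 : Nat) : Int) + 1 = ((mm' : Int) + 1) + 1 := by push_cast; ring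
    rw [h1, PySem.List.pyRange_one_succ_right (by omega), List.foldl_append,
      ih (by omega), List.foldl_cons, List.foldl_nil]
    have hw : ((mm' : Int) + 1) - 1 = ((mm' : Nat) : Int) := by push_cast; ring
    have hj : ((mm' : Int) + 1) = ((mm' + 1 : Nat) : Int) := by push_cast; ring
    rw [hw, rowP_get slices lo (t - 2) mm mm' (by omega),
      hj, rowP_get slices lo (t - 1) mm (mm' + 1) (by omega)]
    have hrow : rowP slices lo t (mm' + 1) = rowP slices lo t mm' ++ [POpt slices lo t (mm' + 1)] := by
      simp [rowP, List.range_succ]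
    rw [hrow, POpt_succ slices lo t mm' ht]
    cases ha : POpt slices lo (t - 1) (mm' + 1) with
    | none =>
      cases hb : POpt slices lo (t - 2) mm' with
      | none => simp only [ha, hb, Option.map_none]
      | some bv => simp only [ha, hb, Option.map_some]
    | some av =>
      cases hb : POpt slices lo (t - 2) mm' with
      | none => simp only [ha, hb, Option.map_none]
      | some bv =>
        simp only [ha, hb, Option.map_some]
        split_ifs with hcmp <;>
          simp only [List.append_cancel_left_eq, List.cons.injEq, Option.some.injEq, and_true] <;>
          omega

theorem outerB (slices : List Int) (lo hi : Int) (mm : Nat) :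
    ∀ (k : Nat) (t : Int), (hi + 1 - t).toNat = k → lo ≤ t → t ≤ hi + 1 →
    ((PySem.List.pyRange t (hi + 1) 1).foldl
      (fun (st : List (Option Int) × List (Option Int)) t' =>
        let x := PySem.List.pyGetD slices t' 0
        let cur := (PySem.List.pyRange 1 ((mm : Int) + 1) 1).foldl
          (fun cur j =>
            let w := PySem.List.pyGetD st.1 (j - 1) none
            let c : Option Int := match w with | none => none | some wv => some (x + wv)
            let b := PySem.List.pyGetD st.2 j none
            match b with
            | none => cur ++ [c]
            | some bv =>
              match c with
              | none => cur ++ [some bv]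
              | some cv => if bv < cv then cur ++ [some cv] else cur ++ [some bv])
          [some 0]
        (st.2, cur))
      (rowP slices lo (t - 2) mm, rowP slices lo (t - 1) mm)).2
      = rowP slices lo hi mm := by
  intro k
  induction k with
  | zero =>
    intro t ht hlo hhi
    have heq : t = hi + 1 := by omega
    subst heq
    rw [show PySem.List.pyRange (hi + 1) (hi + 1) 1 = [] from
      PySem.List.pyRange_one_eq_nil (by omega), List.foldl_nil]
    show rowP slices lo (hi + 1 - 1) mm = rowP slices lo hi mm
    congr 1
    omega
  | succ k ih =>
    intro t ht hlo hhi
    have hlt : t < hi + 1 := by omega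
    rw [show PySem.List.pyRange t (hi + 1) 1 = t :: PySem.List.pyRange (t + 1) (hi + 1) 1 from
      PySem.List.pyRange_one_cons hlt, List.foldl_cons]
    simp only
    rw [innerB slices lo t mm (by omega) mm le_rfl]
    have h1 : rowP slices lo (t - 1) mm = rowP slices lo (t + 1 - 2) mm := by congr 1; omega
    have h2 : rowP slices lo t mm = rowP slices lo (t + 1 - 1) mm := by congr 1; omega
    rw [h1, h2]
    exact ih (t + 1) (by omega) (by omega) (by omega)

theorem finalB (slices : List Int) (lo hi : Int) (mm : Nat) :
    (rowP slices lo hi mm).foldl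
      (fun ans v =>
        match v with
        | none => ans
        | some vv => if ans < vv then vv else ans) 0
      = GB slices lo hi mm := by
  induction mm with
  | zero => simp [rowP, List.range_succ, POpt_zero, GB]
  | succ mm ih =>
    have hrow : rowP slices lo hi (mm + 1) = rowP slices lo hi mm ++ [POpt slices lo hi (mm + 1)] := by
      simp [rowP, List.range_succ]
    rw [hrow, List.foldl_append, ih, List.foldl_cons, List.foldl_nil]
    rw [show GB slices lo hi (mm + 1) = (match POpt slices lo hi (mm + 1) with
      | none => GB slices lo hi mm
      | some v => max (GB slices lo hi mm) v) from rfl]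
    cases hp : POpt slices lo hi (mm + 1) with
    | none => rfl
    | some v =>
      simp only
      rw [max_def]
      split_ifs <;> omega

theorem bestB_eq (slices : List Int) (lo hi : Int) (mm : Nat) (h : lo - 1 <= hi) :
    bestB slices lo hi mm = fAlt slices hi lo mm := by
  simp only [bestB]
  rw [show ((some 0 :: List.replicate mm (none : Option Int)),
        (some 0 :: List.replicate mm (none : Option Int)))
      = (rowP slices lo (lo - 2) mm, rowP slices lo (lo - 1) mm) from by
    rw [rowP_init slices lo (lo - 2) mm (by omega), rowP_init slices lo (lo - 1) mm (by omega)]]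
  rw [outerB slices lo hi mm (hi + 1 - lo).toNat lo rfl le_rfl (by omega)]
  rw [finalB slices lo hi mm, GB_eq_fAlt slices lo (hi + 1 - lo).toNat hi mm (by omega)]

-- ===== VERDICT (by name: the statement is the Claim_ definition above) =====
theorem solve_spec : Claim_equal_solve := by
  intro slices _
  show solve slices = solve_alt slices
  cases slices with
  | nil => decide
  | cons x xs =>
    have hk : 1 <= (x :: xs).length := by simp
    have hm : (x :: xs).length / 3 < (x :: xs).length + 2 :=
      Nat.lt_of_le_of_lt (Nat.div_le_self _ _) (by omega)
    have e1 := pass_eq (x :: xs) (((x :: xs).length : Int) - 2) (((x :: xs).length : Int) - 2)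
      (-1) ((x :: xs).length / 3) hm (by omega) le_rfl (by omega)
    have e2 := pass_eq (x :: xs) (((x :: xs).length : Int) - 1) (((x :: xs).length : Int) - 1)
      0 ((x :: xs).length / 3) hm (by omega) le_rfl (by omega)
    rw [show (-1 : Int) + 1 = 0 by ring] at e1
    rw [show (0 : Int) + 1 = 1 by ring] at e2
    have hsolve : solve (x :: xs)
        = max (fAlt (x :: xs) (((x :: xs).length : Int) - 2) 0 ((x :: xs).length / 3))
              (fAlt (x :: xs) (((x :: xs).length : Int) - 1) 1 ((x :: xs).length / 3)) :=
      congrArg₂ max e1 e2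
    by_cases hm0 : (x :: xs).length / 3 = 0
    · rw [hsolve, hm0, fAlt_zero, fAlt_zero]
      simp only [solve_alt]
      rw [if_pos hm0]
      simp
    · have hk3 : 3 <= (x :: xs).length := by
        by_contra hlt
        exact hm0 (Nat.div_eq_of_lt (by omega))
      have h0 : fAlt (x :: xs) (((x :: xs).length : Int) - 2) 0 ((x :: xs).length / 3)
          = max (PySem.List.pyGetD (x :: xs) 0 0
                  + fAlt (x :: xs) (((x :: xs).length : Int) - 2) 2 ((x :: xs).length / 3 - 1))
                (fAlt (x :: xs) (((x :: xs).length : Int) - 2) 1 ((x :: xs).length / 3)) := by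
        have := fAlt_step (x :: xs) (((x :: xs).length : Int) - 2) 0 ((x :: xs).length / 3)
          hm0 (by push_cast; omega)
        simpa using this
      have hmono : fAlt (x :: xs) (((x :: xs).length : Int) - 2) 1 ((x :: xs).length / 3)
          <= fAlt (x :: xs) (((x :: xs).length : Int) - 1) 1 ((x :: xs).length / 3) := by
        have := fAlt_mono_hi (x :: xs) 1 (((x :: xs).length : Int) - 1) ((x :: xs).length / 3)
        have harg : ((x :: xs).length : Int) - 1 - 1 = ((x :: xs).length : Int) - 2 := by ring
        rwa [harg] at this
      have hb1 : bestB (x :: xs) 2 (((x :: xs).length : Int) - 2) ((x :: xs).length / 3 - 1)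
          = fAlt (x :: xs) (((x :: xs).length : Int) - 2) 2 ((x :: xs).length / 3 - 1) :=
        bestB_eq _ _ _ _ (by push_cast; omega)
      have hb2 : bestB (x :: xs) 1 (((x :: xs).length : Int) - 1) ((x :: xs).length / 3)
          = fAlt (x :: xs) (((x :: xs).length : Int) - 1) 1 ((x :: xs).length / 3) :=
        bestB_eq _ _ _ _ (by push_cast; omega)
      rw [hsolve, h0]
      simp only [solve_alt]
      rw [if_neg hm0, hb1, hb2]
      apply le_antisymm <;> simp only [le_max_iff, max_le_iff] <;> omega
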